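-- pv_equiv track=rewrite | github.com/BeTeLGeUse101/Lessons_GB_Python | Tasks_Lesson_4/Task_5.py | sum_polynomials
-- ===== SOURCE A (Python) =====
-- def sum_polynomials(poly1, poly2):
--     result = []
--     n = max(len(poly1), len(poly2))
--     for i in range(n):
--         coeff1 = poly1[i] if i < len(poly1) else 0
--         coeff2 = poly2[i] if i < len(poly2) else 0
--         result.append(coeff1 + coeff2)
--     return result
-- ===== SOURCE B (Python) =====
-- def sum_polynomials(poly1, poly2):
--     result = [a + b for a, b in zip(poly1, poly2)]
--     longer = poly1 if len(poly1) >= len(poly2) else poly2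
--     result.extend(longer[len(result):])
--     return result
-- ===== Notes on version B (the rewrite author's own statement) =====
-- stated objective: idiomatic
-- what changed: Replaces the indexed loop with per-element bounds guards by a zip over the common prefix followed by an unconditional copy of the longer list's remaining tail slice.
import Mathlib
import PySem

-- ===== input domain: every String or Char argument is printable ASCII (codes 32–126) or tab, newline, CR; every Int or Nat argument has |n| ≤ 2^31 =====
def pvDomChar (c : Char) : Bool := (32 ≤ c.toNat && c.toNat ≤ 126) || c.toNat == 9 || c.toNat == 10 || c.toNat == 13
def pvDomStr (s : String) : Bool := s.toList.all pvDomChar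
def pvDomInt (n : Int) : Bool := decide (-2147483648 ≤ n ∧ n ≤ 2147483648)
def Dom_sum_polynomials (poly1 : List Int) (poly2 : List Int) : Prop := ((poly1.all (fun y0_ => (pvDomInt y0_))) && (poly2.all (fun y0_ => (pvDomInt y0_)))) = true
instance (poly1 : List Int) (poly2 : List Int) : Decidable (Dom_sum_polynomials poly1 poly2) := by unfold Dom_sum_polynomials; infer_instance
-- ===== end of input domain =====

-- B replaces A's indexed loop with per-element bounds guards by a zip over the common
-- prefix plus an unconditional copy of the longer list's tail slice (idiomatic; same cost).


-- ===== PORT A =====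
def sum_polynomials (poly1 : List Int) (poly2 : List Int) : List Int :=
  let n := max poly1.length poly2.length
  (PySem.List.pyRange 0 (n : Int) 1).foldl (fun result i =>
    let coeff1 := if i < (poly1.length : Int) then PySem.List.pyGetD poly1 i 0 else 0
    let coeff2 := if i < (poly2.length : Int) then PySem.List.pyGetD poly2 i 0 else 0
    result ++ [coeff1 + coeff2]) []

-- ===== PORT B =====
def sum_polynomials_alt (poly1 : List Int) (poly2 : List Int) : List Int :=
  let result := (poly1.zip poly2).map (fun ab => ab.1 + ab.2)
  let longer := if poly2.length ≤ poly1.length then poly1 else poly2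
  result ++ PySem.List.slice longer (some (result.length : Int)) none

-- ===== PRECONDITION & SPEC =====
def Spec_sum_polynomials (poly1 : List Int) (poly2 : List Int) (out : List Int) : Prop := out = sum_polynomials_alt poly1 poly2
instance (poly1 : List Int) (poly2 : List Int) (out : List Int) : Decidable (Spec_sum_polynomials poly1 poly2 out) := by unfold Spec_sum_polynomials; infer_instance

-- ===== CLAIM (what is proved, stated in full; the proofs are below) =====
def Claim_equal_sum_polynomials : Prop := ∀ (poly1 : List Int) (poly2 : List Int), Dom_sum_polynomials poly1 poly2 → Spec_sum_polynomials poly1 poly2 (sum_polynomials poly1 poly2)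

-- ===== LEMMAS AND PROOFS =====

-- A's loop, unrolled to a map over range and simplified to getD with default 0.
theorem sum_polynomials_eq_map (poly1 poly2 : List Int) :
    sum_polynomials poly1 poly2 =
      (List.range (max poly1.length poly2.length)).map
        (fun k => poly1.getD k 0 + poly2.getD k 0) := by
  unfold sum_polynomials
  dsimp only
  rw [PySem.List.pyRange_zero_natCast, PySem.List.foldl_append_singleton_eq_map, List.map_map]
  refine List.map_congr_left ?_
  intro k hk
  simp only [Function.comp, PySem.List.pyGetD_natCast, Nat.cast_lt]
  split_ifs with h1 h2 h2 <;>
    simp [List.getD_eq_getElem?_getD, h1, h2]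

theorem sum_polynomials_alt_eq_map (poly1 poly2 : List Int) :
    sum_polynomials_alt poly1 poly2 =
      (List.range (max poly1.length poly2.length)).map
        (fun k => poly1.getD k 0 + poly2.getD k 0) := by
  unfold sum_polynomials_alt
  simp only [List.length_map, List.length_zip, PySem.List.slice_from_natCast]
  apply List.ext_getElem
  · simp only [List.length_append, List.length_map, List.length_zip, List.length_drop,
      List.length_range]
    split_ifs <;> omega
  · intro i hA hB
    simp only [List.length_append, List.length_map, List.length_zip, List.length_drop] at hA
    rw [List.getElem_map, List.getElem_range]
    by_cases hlt : i < min poly1.length poly2.length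
    · rw [List.getElem_append_left (by simpa using hlt)]
      have h1 : i < poly1.length := by omega
      have h2 : i < poly2.length := by omega
      simp [List.getElem_zip, List.getD_eq_getElem?_getD, h1, h2]
    · rw [List.getElem_append_right (by simp; omega)]
      simp only [List.length_map, List.length_zip]
      by_cases hle : poly2.length ≤ poly1.length
      · have h1 : i < poly1.length := by simp [hle] at hA; omega
        simp only [hle, if_true, List.getElem_drop]
        rw [List.getD_eq_getElem?_getD, List.getD_eq_getElem?_getD,
          List.getElem?_eq_none (by omega : poly2.length ≤ i),
          List.getElem?_eq_getElem (by omega : i < poly1.length)]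
        simp only [Option.getD_some, Option.getD_none, add_zero]
        congr 1; omega
      · have h2 : i < poly2.length := by simp [hle] at hA; omega
        simp only [hle, if_false, List.getElem_drop]
        rw [List.getD_eq_getElem?_getD, List.getD_eq_getElem?_getD,
          List.getElem?_eq_none (by omega : poly1.length ≤ i),
          List.getElem?_eq_getElem (by omega : i < poly2.length)]
        simp only [Option.getD_some, Option.getD_none, zero_add]
        congr 1; omega

-- ===== VERDICT (by name: the statement is the Claim_ definition above) =====
theorem sum_polynomials_spec : Claim_equal_sum_polynomials := by
  intro poly1 poly2 _
  unfold Spec_sum_polynomials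
  rw [sum_polynomials_eq_map, sum_polynomials_alt_eq_map]
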